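-- pv_equiv track=rewrite | github.com/manusri2430/Guvi-Problems | beginer/set-5/42-strcmp.py | myStrcmp
-- ===== SOURCE A (Python) =====
-- def myStrcmp(s1, s2):
-- 	minLen = len(s1)
-- 	isFirstElementGreater = False
-- 	if len(s1) > len(s2):
-- 		minLen = len(s2);
-- 		isFirstElementGreater = True
--
-- 	for i in range(minLen):
-- 		if s1[i] < s2[i]:
-- 			isFirstElementGreater = False;
-- 			break;
-- 		elif s1[i] > s2[i]:
-- 			isFirstElementGreater = True;
-- 			break;
--
-- 	if isFirstElementGreater:
-- 		return s1
-- 	else: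
-- 		return s2
-- ===== SOURCE B (Python) =====
-- def myStrcmp(s1, s2):
--     return s1 if s1 > s2 else s2
-- ===== Notes on version B (the rewrite author's own statement) =====
-- stated objective: simpler
-- what changed: Replaces the explicit index loop with length-flag bookkeeping by the single closed-form comparison 's1 if s1 > s2 else s2' (s2 on a tie, matching A); the C-level string comparison also makes it measurably faster.
import Mathlib
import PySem

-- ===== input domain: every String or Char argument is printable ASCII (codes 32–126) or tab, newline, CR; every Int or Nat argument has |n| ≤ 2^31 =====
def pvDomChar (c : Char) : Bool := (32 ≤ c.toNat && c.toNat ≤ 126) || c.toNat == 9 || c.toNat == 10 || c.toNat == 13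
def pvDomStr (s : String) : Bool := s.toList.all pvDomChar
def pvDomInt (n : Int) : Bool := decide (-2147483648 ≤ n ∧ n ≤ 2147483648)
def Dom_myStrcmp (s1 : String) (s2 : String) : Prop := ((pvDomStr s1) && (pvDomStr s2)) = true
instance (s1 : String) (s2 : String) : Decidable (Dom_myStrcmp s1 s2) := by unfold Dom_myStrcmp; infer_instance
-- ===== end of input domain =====

-- B replaces A's explicit character loop and length-flag bookkeeping with the closed-form
-- comparison `s1 if s1 > s2 else s2` (s2 on ties, as in A); objective: simpler.


-- ===== PORT A =====
-- the `for i in range(minLen)` loop with break, walking both strings in lockstep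
-- (minLen = min of the two lengths, so pairwise recursion is exact); `flag` is
-- `isFirstElementGreater` entering the loop.
def myStrcmpLoop (flag : Bool) : List Char → List Char → Bool
  | c1 :: r1, c2 :: r2 =>
      if c1 < c2 then false
      else if c2 < c1 then true
      else myStrcmpLoop flag r1 r2
  | _, _ => flag

def myStrcmp (s1 : String) (s2 : String) : String :=
  let isFirstElementGreater := decide (s2.toList.length < s1.toList.length)
  if myStrcmpLoop isFirstElementGreater s1.toList s2.toList then s1 else s2

-- ===== PORT B =====
def myStrcmp_alt (s1 : String) (s2 : String) : String :=
  if s2 < s1 then s1 else s2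

-- ===== PRECONDITION & SPEC =====
def Spec_myStrcmp (s1 : String) (s2 : String) (out : String) : Prop := out = myStrcmp_alt s1 s2
instance (s1 : String) (s2 : String) (out : String) : Decidable (Spec_myStrcmp s1 s2 out) := by unfold Spec_myStrcmp; infer_instance

-- ===== CLAIM (what is proved, stated in full; the proofs are below) =====
def Claim_equal_myStrcmp : Prop := ∀ (s1 : String) (s2 : String), Dom_myStrcmp s1 s2 → Spec_myStrcmp s1 s2 (myStrcmp s1 s2)

-- ===== LEMMAS AND PROOFS =====
-- A's loop (seeded with the length comparison) computes exactly `l2 < l1` lexicographically.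
theorem myStrcmpLoop_eq_lt (l1 l2 : List Char) :
    myStrcmpLoop (decide (l2.length < l1.length)) l1 l2 = decide (l2 < l1) := by
  induction l1 generalizing l2 with
  | nil =>
      cases l2 <;> simp [myStrcmpLoop, List.not_lt_nil]
  | cons c1 r1 ih =>
      cases l2 with
      | nil => simp [myStrcmpLoop, List.nil_lt_cons]
      | cons c2 r2 =>
          by_cases h12 : c1 < c2
          · simp [myStrcmpLoop, h12, List.cons_lt_cons_iff, lt_asymm h12, h12.ne']
          · by_cases h21 : c2 < c1
            · simp [myStrcmpLoop, h12, h21, List.cons_lt_cons_iff]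
            · have hceq : c1 = c2 := le_antisymm (not_lt.1 h21) (not_lt.1 h12)
              subst hceq
              have hlen : (r2.length < r1.length) = ((c1 :: r2).length < (c1 :: r1).length) := by
                simp
              have hlt : (r2 < r1) = ((c1 :: r2) < (c1 :: r1)) := by
                simp [List.cons_lt_cons_iff]
              simp only [myStrcmpLoop, if_neg h12, if_neg h21, ← hlen, ← hlt, ih]

-- ===== VERDICT (by name: the statement is the Claim_ definition above) =====
theorem myStrcmp_spec : Claim_equal_myStrcmp := by
  intro s1 s2 _
  unfold Spec_myStrcmp myStrcmp myStrcmp_alt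
  simp only [myStrcmpLoop_eq_lt, ← String.lt_iff_toList_lt]
  by_cases h : s2 < s1 <;> simp [h]
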